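-- pv_equiv track=rewrite | github.com/OlaszPL/Introduction_to_computer_science_course | Kolokwia 2/zad3_2020.py | zad20
-- ===== SOURCE A (Python) =====
-- def zad20(T):
--     n = len(T)
--     max_sum = -float('inf')
--     res_row1, res_column1, res_row2, res_column2 = 0, 0, 0, 0
--
--     for row1 in range(n): # wybor pozycji wiezy1
--         for column1 in range(n):
--             for row2 in range(n): # wybor pozycji wiezy2
--                 for column2 in range(n):
--                     sum = 0
--                     if row1 != row2 and column1 != column2:
--                         sum -= (2 * T[row1][column1] + 2 * T[row2][column2]) # odejmuje wartosi wiez ktore bylyby dodane przy sumowaniu rzedu i kolumny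
--                         sum -= (T[row1][column2] + T[row2][column1]) # odemuje raz przeciecia
--                         for i in range(n):
--                             sum += T[row1][i] + T[i][column1] + T[row2][i] + T[i][column2]
--                     elif row1 == row2 and column1 != column2:
--                         sum -= T[row1][column1] + T[row2][column2] # odejmujemy raz po wartosci wiezy bo tutaj jak 1 szachuje 2 to to sie wlicza
--                         for i in range(n):
--                             sum += T[row1][i] + T[i][column1] + T[i][column2] # dodajemy tylko raz rzad
--                     elif row1 != row2 and column1 == column2:
--                         sum -= T[row1][column1] + T[row2][column2] # odejmujemy raz po wartosci wiezy bo tutaj jak 1 szachuje 2 to to sie wlicza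
--                         for i in range(n):
--                             sum += T[row1][i] + T[i][column1] + T[row2][i]  # dodajemy tylko kolumne
--                     if sum > max_sum:
--                         max_sum = sum
--                         res_row1, res_column1, res_row2, res_column2 = row1, column1, row2, column2
--
--     return (res_row1, res_column1), (res_row2, res_column2)
-- ===== SOURCE B (Python) =====
-- def zad20(T):
--     n = len(T)
--     # precomputed row/column sums make each rook-pair evaluable in O(1)
--     R = [sum(T[r][i] for i in range(n)) for r in range(n)]
--     C = [sum(T[i][c] for i in range(n)) for c in range(n)]
--     best = None
--     res = ((0, 0), (0, 0))
--     for r1 in range(n):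
--         for c1 in range(n):
--             for r2 in range(n):
--                 for c2 in range(n):
--                     if r1 != r2 and c1 != c2:
--                         s = (R[r1] + C[c1] + R[r2] + C[c2]
--                              - 2 * T[r1][c1] - 2 * T[r2][c2]
--                              - T[r1][c2] - T[r2][c1])
--                     elif r1 == r2 and c1 != c2:
--                         s = R[r1] + C[c1] + C[c2] - T[r1][c1] - T[r1][c2]
--                     elif r1 != r2:
--                         s = R[r1] + R[r2] + C[c1] - T[r1][c1] - T[r2][c1]
--                     else:
--                         s = 0
--                     if best is None or s > best:
--                         best = s
--                         res = ((r1, c1), (r2, c2))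
--     return res
-- ===== Notes on version B (the rewrite author's own statement) =====
-- stated objective: faster
-- what changed: B precomputes the row sums and column sums once, so each rook-pair candidate is evaluated by an O(1) closed formula instead of A's inner O(n) rescan of the row/column cells.
-- outside the precondition, e.g. on zad20([[]]): A returns ((0, 0), (0, 0)), B raises IndexError
import Mathlib
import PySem

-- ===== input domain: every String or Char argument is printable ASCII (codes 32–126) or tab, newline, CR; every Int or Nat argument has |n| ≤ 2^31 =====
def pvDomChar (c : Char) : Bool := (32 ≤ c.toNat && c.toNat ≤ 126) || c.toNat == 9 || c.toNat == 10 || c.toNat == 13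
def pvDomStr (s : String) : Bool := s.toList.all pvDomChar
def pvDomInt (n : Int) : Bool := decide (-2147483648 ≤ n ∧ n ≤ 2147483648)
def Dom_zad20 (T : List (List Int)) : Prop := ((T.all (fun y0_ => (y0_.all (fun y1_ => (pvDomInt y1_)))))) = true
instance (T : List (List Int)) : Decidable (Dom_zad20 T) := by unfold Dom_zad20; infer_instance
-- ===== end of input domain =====

-- B replaces A's O(n) per-pair rescans by precomputed row/column sums (O(1) per rook pair),
-- O(n^5) → O(n^4); equivalence is about the return value, neither program mutates T.

-- T[r][c]; exact under Pre_zad20 (both indices in range there; Python raises outside, excluded by Pre_)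
def tIdx (T : List (List Int)) (r c : Int) : Int :=
  PySem.List.pyGetD (PySem.List.pyGetD T r []) c 0

-- best-so-far update shared by both Pythons verbatim: `none` plays the role of -float('inf')
-- (every candidate sum is an Int, so `sum > -inf` is exactly the `none` case)
def rookStep (st : Option Int × Int × Int × Int × Int) (s r1 c1 r2 c2 : Int) :
    Option Int × Int × Int × Int × Int :=
  match st with
  | (none, _, _, _, _) => (some s, r1, c1, r2, c2)
  | (some m, a, b, c, d) => if m < s then (some s, r1, c1, r2, c2) else (some m, a, b, c, d)

-- ===== PORT A =====
def zad20Loop (T : List (List Int)) : Option Int × Int × Int × Int × Int :=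
  let n : Int := (T.length : Int)
  (PySem.List.pyRange 0 n).foldl (fun st row1 =>
    (PySem.List.pyRange 0 n).foldl (fun st column1 =>
      (PySem.List.pyRange 0 n).foldl (fun st row2 =>
        (PySem.List.pyRange 0 n).foldl (fun st column2 =>
          let sum : Int :=
            if row1 ≠ row2 ∧ column1 ≠ column2 then
              (PySem.List.pyRange 0 n).foldl
                (fun s i => s + (tIdx T row1 i + tIdx T i column1 + tIdx T row2 i + tIdx T i column2))
                (0 - (2 * tIdx T row1 column1 + 2 * tIdx T row2 column2)
                   - (tIdx T row1 column2 + tIdx T row2 column1))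
            else if row1 = row2 ∧ column1 ≠ column2 then
              (PySem.List.pyRange 0 n).foldl
                (fun s i => s + (tIdx T row1 i + tIdx T i column1 + tIdx T i column2))
                (0 - (tIdx T row1 column1 + tIdx T row2 column2))
            else if row1 ≠ row2 ∧ column1 = column2 then
              (PySem.List.pyRange 0 n).foldl
                (fun s i => s + (tIdx T row1 i + tIdx T i column1 + tIdx T row2 i))
                (0 - (tIdx T row1 column1 + tIdx T row2 column2))
            else 0
          rookStep st sum row1 column1 row2 column2) st) st) st)
    ((none : Option Int), (0 : Int), (0 : Int), (0 : Int), (0 : Int))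

def zad20 (T : List (List Int)) : List (List Int) :=
  let fin := zad20Loop T
  [[fin.2.1, fin.2.2.1], [fin.2.2.2.1, fin.2.2.2.2]]

-- ===== PORT B =====
def zad20AltLoop (T : List (List Int)) : Option Int × Int × Int × Int × Int :=
  let n : Int := (T.length : Int)
  let R : List Int := (PySem.List.pyRange 0 n).map
    (fun r => ((PySem.List.pyRange 0 n).map (fun i => tIdx T r i)).sum)
  let C : List Int := (PySem.List.pyRange 0 n).map
    (fun c => ((PySem.List.pyRange 0 n).map (fun i => tIdx T i c)).sum)
  (PySem.List.pyRange 0 n).foldl (fun st r1 =>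
    (PySem.List.pyRange 0 n).foldl (fun st c1 =>
      (PySem.List.pyRange 0 n).foldl (fun st r2 =>
        (PySem.List.pyRange 0 n).foldl (fun st c2 =>
          let s : Int :=
            if r1 ≠ r2 ∧ c1 ≠ c2 then
              PySem.List.pyGetD R r1 0 + PySem.List.pyGetD C c1 0
                + PySem.List.pyGetD R r2 0 + PySem.List.pyGetD C c2 0
                - 2 * tIdx T r1 c1 - 2 * tIdx T r2 c2 - tIdx T r1 c2 - tIdx T r2 c1
            else if r1 = r2 ∧ c1 ≠ c2 then
              PySem.List.pyGetD R r1 0 + PySem.List.pyGetD C c1 0 + PySem.List.pyGetD C c2 0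
                - tIdx T r1 c1 - tIdx T r1 c2
            else if r1 ≠ r2 then
              PySem.List.pyGetD R r1 0 + PySem.List.pyGetD R r2 0 + PySem.List.pyGetD C c1 0
                - tIdx T r1 c1 - tIdx T r2 c1
            else 0
          rookStep st s r1 c1 r2 c2) st) st) st)
    ((none : Option Int), (0 : Int), (0 : Int), (0 : Int), (0 : Int))

def zad20_alt (T : List (List Int)) : List (List Int) :=
  let fin := zad20AltLoop T
  [[fin.2.1, fin.2.2.1], [fin.2.2.2.1, fin.2.2.2.2]]

-- ===== PRECONDITION & SPEC =====
-- Pre_: every row has at least len(T) entries; on shorter rows both Pythons raise IndexError,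
-- except the degenerate corner of a single empty row, where A happens never to index and returns while B's precompute raises (see the cite).
def Pre_zad20 (T : List (List Int)) : Prop := ∀ row ∈ T, T.length ≤ row.length
instance (T : List (List Int)) : Decidable (Pre_zad20 T) := by unfold Pre_zad20; infer_instance
def pvWitness_zad20 : List (List Int) := [[1, 2], [3, 4]]
def Spec_zad20 (T : List (List Int)) (out : List (List Int)) : Prop := out = zad20_alt T
instance (T : List (List Int)) (out : List (List Int)) : Decidable (Spec_zad20 T out) := by unfold Spec_zad20; infer_instance

-- ===== CLAIM (what is proved, stated in full; the proofs are below) =====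
def Claim_equal_zad20 : Prop := ∀ (T : List (List Int)), Dom_zad20 T → Pre_zad20 T → Spec_zad20 T (zad20 T)

-- ===== LEMMAS AND PROOFS =====

-- the per-quadruple candidate sums of the two programs agree for in-range rook positions
lemma sum_eq (T : List (List Int)) (r1 c1 r2 c2 : Int)
    (hr1 : 0 ≤ r1 ∧ r1 < (T.length : Int)) (hc1 : 0 ≤ c1 ∧ c1 < (T.length : Int))
    (hr2 : 0 ≤ r2 ∧ r2 < (T.length : Int)) (hc2 : 0 ≤ c2 ∧ c2 < (T.length : Int)) :
    (if r1 ≠ r2 ∧ c1 ≠ c2 then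
        (PySem.List.pyRange 0 (T.length : Int)).foldl
          (fun s i => s + (tIdx T r1 i + tIdx T i c1 + tIdx T r2 i + tIdx T i c2))
          (0 - (2 * tIdx T r1 c1 + 2 * tIdx T r2 c2) - (tIdx T r1 c2 + tIdx T r2 c1))
      else if r1 = r2 ∧ c1 ≠ c2 then
        (PySem.List.pyRange 0 (T.length : Int)).foldl
          (fun s i => s + (tIdx T r1 i + tIdx T i c1 + tIdx T i c2))
          (0 - (tIdx T r1 c1 + tIdx T r2 c2))
      else if r1 ≠ r2 ∧ c1 = c2 then
        (PySem.List.pyRange 0 (T.length : Int)).foldl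
          (fun s i => s + (tIdx T r1 i + tIdx T i c1 + tIdx T r2 i))
          (0 - (tIdx T r1 c1 + tIdx T r2 c2))
      else 0)
    =
    (if r1 ≠ r2 ∧ c1 ≠ c2 then
        PySem.List.pyGetD ((PySem.List.pyRange 0 (T.length : Int)).map
            (fun r => ((PySem.List.pyRange 0 (T.length : Int)).map (fun i => tIdx T r i)).sum)) r1 0
          + PySem.List.pyGetD ((PySem.List.pyRange 0 (T.length : Int)).map
            (fun c => ((PySem.List.pyRange 0 (T.length : Int)).map (fun i => tIdx T i c)).sum)) c1 0
          + PySem.List.pyGetD ((PySem.List.pyRange 0 (T.length : Int)).map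
            (fun r => ((PySem.List.pyRange 0 (T.length : Int)).map (fun i => tIdx T r i)).sum)) r2 0
          + PySem.List.pyGetD ((PySem.List.pyRange 0 (T.length : Int)).map
            (fun c => ((PySem.List.pyRange 0 (T.length : Int)).map (fun i => tIdx T i c)).sum)) c2 0
          - 2 * tIdx T r1 c1 - 2 * tIdx T r2 c2 - tIdx T r1 c2 - tIdx T r2 c1
      else if r1 = r2 ∧ c1 ≠ c2 then
        PySem.List.pyGetD ((PySem.List.pyRange 0 (T.length : Int)).map
            (fun r => ((PySem.List.pyRange 0 (T.length : Int)).map (fun i => tIdx T r i)).sum)) r1 0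
          + PySem.List.pyGetD ((PySem.List.pyRange 0 (T.length : Int)).map
            (fun c => ((PySem.List.pyRange 0 (T.length : Int)).map (fun i => tIdx T i c)).sum)) c1 0
          + PySem.List.pyGetD ((PySem.List.pyRange 0 (T.length : Int)).map
            (fun c => ((PySem.List.pyRange 0 (T.length : Int)).map (fun i => tIdx T i c)).sum)) c2 0
          - tIdx T r1 c1 - tIdx T r1 c2
      else if r1 ≠ r2 then
        PySem.List.pyGetD ((PySem.List.pyRange 0 (T.length : Int)).map
            (fun r => ((PySem.List.pyRange 0 (T.length : Int)).map (fun i => tIdx T r i)).sum)) r1 0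
          + PySem.List.pyGetD ((PySem.List.pyRange 0 (T.length : Int)).map
            (fun r => ((PySem.List.pyRange 0 (T.length : Int)).map (fun i => tIdx T r i)).sum)) r2 0
          + PySem.List.pyGetD ((PySem.List.pyRange 0 (T.length : Int)).map
            (fun c => ((PySem.List.pyRange 0 (T.length : Int)).map (fun i => tIdx T i c)).sum)) c1 0
          - tIdx T r1 c1 - tIdx T r2 c1
      else 0) := by
  rw [PySem.List.pyGetD_map_pyRange_of_nonneg _ _ _ _ hr1.1 hr1.2,
      PySem.List.pyGetD_map_pyRange_of_nonneg _ _ _ _ hc1.1 hc1.2,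
      PySem.List.pyGetD_map_pyRange_of_nonneg _ _ _ _ hr2.1 hr2.2,
      PySem.List.pyGetD_map_pyRange_of_nonneg _ _ _ _ hc2.1 hc2.2]
  split_ifs with h1 h2 h3 <;> try tauto
  · rw [PySem.List.foldl_add]
    simp only [PySem.List.sum_map_add_int]
    ring
  · obtain ⟨he, _⟩ := h2
    subst he
    rw [PySem.List.foldl_add]
    simp only [PySem.List.sum_map_add_int]
    ring
  · obtain ⟨_, he⟩ := h3
    subst he
    rw [PySem.List.foldl_add]
    simp only [PySem.List.sum_map_add_int]
    ring

lemma loop_eq (T : List (List Int)) : zad20Loop T = zad20AltLoop T := by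
  unfold zad20Loop zad20AltLoop
  apply PySem.List.foldl_congr_mem
  intro st r1 hr1
  apply PySem.List.foldl_congr_mem
  intro st c1 hc1
  apply PySem.List.foldl_congr_mem
  intro st r2 hr2
  apply PySem.List.foldl_congr_mem
  intro st c2 hc2
  rw [PySem.List.mem_pyRange_one] at hr1 hc1 hr2 hc2
  exact congrArg (fun s => rookStep st s r1 c1 r2 c2) (sum_eq T r1 c1 r2 c2 hr1 hc1 hr2 hc2)

-- ===== VERDICT (by name: the statement is the Claim_ definition above) =====
theorem zad20_spec : Claim_equal_zad20 := by
  intro T _ _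
  unfold Spec_zad20 zad20 zad20_alt
  rw [loop_eq]
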